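-- pv_equiv track=rewrite | github.com/EchoBot25/EchoBot | app.py | crisis_compass
-- ===== SOURCE A (Python) =====
-- SELF_HARM_TRIGGERS = ["hurt myself", "cut", "end it", "kill myself"]
--
-- def crisis_compass(user_message):
--     steps = [
--         "I’m here. Breathe with me—slow in, slow out. What’s hitting you hardest right now?",
--         "Made it through every worst day—time’s a stubborn bastard, keeps moving. One thing for tomorrow?",
--         "If it’s too heavy, 988’s there—talked me down once. Stay with me instead?"
--     ]
--     risk = 0
--     if any(trigger in user_message.lower() for trigger in SELF_HARM_TRIGGERS):
--         risk = 8 if "hurt myself" in user_message.lower() or "cut" in user_message.lower() else 10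
--     return steps, risk
-- ===== SOURCE B (Python) =====
-- TABLE = {"hurt myself": 8, "cut": 8, "end it": 10, "kill myself": 10}
--
-- def crisis_compass(user_message):
--     steps = [
--         "I’m here. Breathe with me—slow in, slow out. What’s hitting you hardest right now?",
--         "Made it through every worst day—time’s a stubborn bastard, keeps moving. One thing for tomorrow?",
--         "If it’s too heavy, 988’s there—talked me down once. Stay with me instead?"
--     ]
--     msg = user_message.lower()
--     matched = [score for trigger, score in TABLE.items() if trigger in msg]
--     return steps, (min(matched) if matched else 0)
-- ===== Notes on version B (the rewrite author's own statement) =====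
-- stated objective: simpler
-- what changed: Replaces the two-stage any()/or-branch risk logic with a trigger-to-score table scanned once: risk is the minimum score among matched triggers (0 if none), which reproduces the 8-beats-10 precedence without branching.
import Mathlib
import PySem

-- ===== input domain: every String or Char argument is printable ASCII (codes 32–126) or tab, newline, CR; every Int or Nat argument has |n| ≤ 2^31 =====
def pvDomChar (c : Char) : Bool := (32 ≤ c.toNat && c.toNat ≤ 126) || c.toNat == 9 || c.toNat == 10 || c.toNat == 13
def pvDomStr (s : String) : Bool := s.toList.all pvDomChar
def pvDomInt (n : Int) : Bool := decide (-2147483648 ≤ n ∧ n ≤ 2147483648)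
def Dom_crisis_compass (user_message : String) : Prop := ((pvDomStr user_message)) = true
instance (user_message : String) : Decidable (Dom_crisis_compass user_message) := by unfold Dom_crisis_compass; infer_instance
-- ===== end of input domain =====

-- ===== PORT A =====
-- B replaces the any()/or-branch risk logic with a trigger→score table and min-over-matches (objective: simpler).
def selfHarmTriggers : List String := ["hurt myself", "cut", "end it", "kill myself"]

def crisisSteps : List String := [
  "I’m here. Breathe with me—slow in, slow out. What’s hitting you hardest right now?",
  "Made it through every worst day—time’s a stubborn bastard, keeps moving. One thing for tomorrow?",
  "If it’s too heavy, 988’s there—talked me down once. Stay with me instead?"]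

def crisis_compass (user_message : String) : List String × Int :=
  let steps := crisisSteps
  let risk : Int := 0
  let risk :=
    if selfHarmTriggers.any (fun t => PySem.Str.isIn t (PySem.Str.lower user_message)) then
      (if PySem.Str.isIn "hurt myself" (PySem.Str.lower user_message)
          || PySem.Str.isIn "cut" (PySem.Str.lower user_message) then (8 : Int) else 10)
    else risk
  (steps, risk)

-- ===== PORT B =====
def crisisTable : List (String × Int) :=
  [("hurt myself", 8), ("cut", 8), ("end it", 10), ("kill myself", 10)]

def crisis_compass_alt (user_message : String) : List String × Int :=
  let msg := PySem.Str.lower user_message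
  let matched := (crisisTable.filter (fun p => PySem.Str.isIn p.1 msg)).map Prod.snd
  let risk : Int := match PySem.List.min? matched (fun x => x) with
    | some v => v
    | none => 0
  (crisisSteps, risk)

-- ===== PRECONDITION & SPEC =====
def Spec_crisis_compass (user_message : String) (out : List String × Int) : Prop := out = crisis_compass_alt user_message
instance (user_message : String) (out : List String × Int) : Decidable (Spec_crisis_compass user_message out) := by unfold Spec_crisis_compass; infer_instance

-- ===== CLAIM (what is proved, stated in full; the proofs are below) =====
def Claim_equal_crisis_compass : Prop := ∀ (user_message : String), Dom_crisis_compass user_message → Spec_crisis_compass user_message (crisis_compass user_message)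

-- ===== LEMMAS AND PROOFS =====

-- ===== VERDICT (by name: the statement is the Claim_ definition above) =====
theorem crisis_compass_spec : Claim_equal_crisis_compass := by
  intro m _
  by_cases h1 : PySem.Str.isIn "hurt myself" (PySem.Str.lower m) = true <;>
  by_cases h2 : PySem.Str.isIn "cut" (PySem.Str.lower m) = true <;>
  by_cases h3 : PySem.Str.isIn "end it" (PySem.Str.lower m) = true <;>
  by_cases h4 : PySem.Str.isIn "kill myself" (PySem.Str.lower m) = true <;>
  simp_all [Spec_crisis_compass, crisis_compass, crisis_compass_alt,
    selfHarmTriggers, crisisTable, crisisSteps, PySem.List.min?]
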